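-- pv_equiv track=rewrite | github.com/rizen94/News-Intelligence-Public | api/domains/system_monitoring/routes/sql_explorer.py | _semicolon_outside_strings
-- ===== SOURCE A (Python) =====
-- def _semicolon_outside_strings(sql: str) -> bool:
--     """True if there is a semicolon not inside a single-quoted literal (SQL standard '' escape)."""
--     s = sql.rstrip().rstrip(";").strip()
--     in_quote = False
--     i = 0
--     while i < len(s):
--         c = s[i]
--         if c == "'":
--             if in_quote and i + 1 < len(s) and s[i + 1] == "'":
--                 i += 2
--                 continue
--             in_quote = not in_quote
--             i += 1
--             continue
--         if c == ";" and not in_quote: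
--             return True
--         i += 1
--     return False
-- ===== SOURCE B (Python) =====
-- def _semicolon_outside_strings(sql: str) -> bool:
--     """True if there is a semicolon not inside a single-quoted literal (SQL standard '' escape)."""
--     s = sql.rstrip().rstrip(";").strip()
--     outside = True
--     for seg in s.split("'"):
--         if outside and ";" in seg:
--             return True
--         outside = not outside
--     return False
-- ===== Notes on version B (the rewrite author's own statement) =====
-- stated objective: faster
-- what changed: Replaces the stateful index-based character scanner with explicit escape handling by splitting on the quote character and checking only the alternating outside-quote segments (the SQL quote-doubling escape is handled implicitly by the alternation); split and substring search run in C instead of a per-character Python loop.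
import Mathlib
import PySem

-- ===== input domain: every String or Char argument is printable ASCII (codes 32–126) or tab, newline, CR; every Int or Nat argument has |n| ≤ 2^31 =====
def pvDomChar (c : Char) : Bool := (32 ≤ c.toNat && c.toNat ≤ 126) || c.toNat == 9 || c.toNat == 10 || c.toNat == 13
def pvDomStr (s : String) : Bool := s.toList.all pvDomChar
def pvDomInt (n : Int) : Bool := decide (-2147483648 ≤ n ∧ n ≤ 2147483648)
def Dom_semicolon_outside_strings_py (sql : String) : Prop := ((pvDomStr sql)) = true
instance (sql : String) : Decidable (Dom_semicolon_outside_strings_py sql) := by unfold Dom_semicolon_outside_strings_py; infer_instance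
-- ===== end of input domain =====

-- B replaces A's index-based char scanner (with explicit '' escape handling) by splitting on the
-- quote character and checking only the alternating outside-quote segments (split runs in C;
-- a timing run measured B faster).

-- ===== PORT A =====
-- shared preprocessing  s = sql.rstrip().rstrip(";").strip()
-- rstrip(";") is ported by hand (drop all trailing ';'); exact since the strip set is the single char ';'
def pvPreprocess (cs : List Char) : List Char :=
  PySem.Chars.strip (((PySem.Chars.rstrip cs).reverse.dropWhile (fun c => c == ';')).reverse)

-- A's while-loop: index i becomes the remaining suffix; the i += 2 escape skip drops two chars
def pvScan (inq : Bool) : List Char → Bool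
  | [] => false
  | c :: rest =>
    if c == '\'' then
      if inq then
        match rest with
        | c2 :: rest2 => if c2 == '\'' then pvScan inq rest2 else pvScan (!inq) (c2 :: rest2)
        | [] => pvScan (!inq) ([] : List Char)
      else pvScan (!inq) rest
    else if c == ';' && !inq then true
    else pvScan inq rest

def semicolon_outside_strings_py (sql : String) : Bool :=
  pvScan false (pvPreprocess sql.toList)

-- ===== PORT B =====
-- for seg in s.split("'"): …  (Python's single-char str.split is Mathlib's List.splitOn)
def pvSegLoop (outside : Bool) : List (List Char) → Bool
  | [] => false
  | seg :: rest =>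
    if outside && PySem.Chars.isIn [';'] seg then true
    else pvSegLoop (!outside) rest

def semicolon_outside_strings_py_alt (sql : String) : Bool :=
  pvSegLoop true (List.splitOn '\'' (pvPreprocess sql.toList))

-- ===== PRECONDITION & SPEC =====
def Spec_semicolon_outside_strings_py (sql : String) (out : Bool) : Prop := out = semicolon_outside_strings_py_alt sql
instance (sql : String) (out : Bool) : Decidable (Spec_semicolon_outside_strings_py sql out) := by unfold Spec_semicolon_outside_strings_py; infer_instance

-- ===== CLAIM (what is proved, stated in full; the proofs are below) =====
def Claim_equal_semicolon_outside_strings_py : Prop := ∀ (sql : String), Dom_semicolon_outside_strings_py sql → Spec_semicolon_outside_strings_py sql (semicolon_outside_strings_py sql)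

-- ===== LEMMAS AND PROOFS =====

-- the escape-free toggle scanner: middle form between A's scanner and B's segment walk
def pvToggle (inq : Bool) : List Char → Bool
  | [] => false
  | c :: rest =>
    if c == '\'' then pvToggle (!inq) rest
    else if c == ';' && !inq then true
    else pvToggle inq rest

-- A's two-char escape skip keeps inq; two toggles do the same, so the scanners agree
lemma pvScan_eq_pvToggle : ∀ (n : Nat) (l : List Char), l.length ≤ n →
    ∀ inq, pvScan inq l = pvToggle inq l := by
  intro n
  induction n with
  | zero =>
    intro l hl inq
    have : l = [] := by cases l <;> simp_all
    subst this; rfl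
  | succ n ih =>
    intro l hl inq
    match l with
    | [] => rfl
    | c :: rest =>
      rw [pvScan.eq_def]; dsimp only
      by_cases hc : c == '\''
      · rw [if_pos hc]
        cases inq with
        | false =>
          rw [if_neg (by decide)]
          simp only [Bool.not_false]
          rw [ih rest (by simpa using hl) true]
          simp [pvToggle, hc]
        | true =>
          rw [if_pos rfl]
          match rest with
          | [] =>
            rw [pvScan.eq_def]
            simp [pvToggle, hc]
          | c2 :: rest2 =>
            dsimp only
            by_cases hc2 : c2 == '\''
            · rw [if_pos hc2]
              rw [ih rest2 (by simp at hl ⊢; omega) true]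
              simp [pvToggle, hc, eq_of_beq hc2]
            · rw [if_neg hc2]
              simp only [Bool.not_true]
              rw [ih (c2 :: rest2) (by simpa using hl) false]
              simp [pvToggle, hc, hc2]
      · rw [if_neg hc]
        by_cases hs : (c == ';' && !inq) = true
        · rw [if_pos hs]
          simp [pvToggle, hc, hs]
        · rw [if_neg hs]
          rw [ih rest (by simpa using hl) inq]
          simp [pvToggle, hc, hs]

lemma isIn_semi_cons (c : Char) (h : List Char) :
    PySem.Chars.isIn [';'] (c :: h) = ((c == ';') || PySem.Chars.isIn [';'] h) := by
  by_cases hc : c = ';'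
  · subst hc
    simp [PySem.Chars.isIn_iff_infix, List.singleton_infix_iff]
  · have h1 : PySem.Chars.isIn [';'] (c :: h) = PySem.Chars.isIn [';'] h := by
      rcases hb : PySem.Chars.isIn [';'] h with _ | _
      · rw [PySem.Chars.isIn_eq_false_iff] at hb ⊢
        simp [List.singleton_infix_iff] at hb ⊢
        exact ⟨fun he => hc he.symm, hb⟩
      · rw [PySem.Chars.isIn_iff_infix] at hb ⊢
        simp [List.singleton_infix_iff] at hb ⊢
        exact Or.inr hb
    simp [h1, hc]

lemma isIn_semi_nil : PySem.Chars.isIn [';'] ([] : List Char) = false := by decide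

-- the toggle scanner walks exactly the alternating segments of the split
lemma pvToggle_eq_pvSegLoop : ∀ (l : List Char) (inq : Bool),
    pvToggle inq l = pvSegLoop (!inq) (List.splitOn '\'' l) := by
  intro l
  induction l with
  | nil =>
    intro inq
    simp [pvToggle, pvSegLoop, List.splitOn, List.splitOnP_nil, isIn_semi_nil]
  | cons c rest ih =>
    intro inq
    by_cases hc : c == '\''
    · have hsp : List.splitOn '\'' (c :: rest) = [] :: List.splitOn '\'' rest := by
        simp [List.splitOn, List.splitOnP_cons, hc]
      rw [hsp]
      simp only [pvToggle, hc, if_pos, pvSegLoop, isIn_semi_nil, Bool.and_false,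
        Bool.false_eq_true, Bool.not_not]
      rw [ih (!inq)]
      simp
    · rcases hrest : List.splitOn '\'' rest with _ | ⟨h, t⟩
      · exact absurd hrest (by simp [List.splitOn]; exact List.splitOnP_ne_nil _ _)
      · have hsp : List.splitOn '\'' (c :: rest) = (c :: h) :: t := by
          simp [List.splitOn, List.splitOnP_cons, hc]
          rw [show List.splitOnP (fun b => b == '\'') rest = h :: t from by
            simpa [List.splitOn] using hrest]
          rfl
        rw [hsp]
        have ihr := ih inq
        rw [hrest] at ihr
        simp only [pvToggle, hc, pvSegLoop, isIn_semi_cons] at ihr ⊢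
        by_cases hsemi : c == ';'
        · cases hinq : inq with
          | false => simp [hsemi]
          | true =>
            rw [hinq] at ihr
            simp only [Bool.not_true, Bool.and_false, Bool.false_and, Bool.false_eq_true, if_false] at ihr ⊢
            exact ihr
        · simp only [hsemi, Bool.false_or] at ihr ⊢
          simpa [hsemi] using ihr

-- ===== VERDICT (by name: the statement is the Claim_ definition above) =====
theorem semicolon_outside_strings_py_spec : Claim_equal_semicolon_outside_strings_py := by
  intro sql _
  unfold Spec_semicolon_outside_strings_py semicolon_outside_strings_py semicolon_outside_strings_py_alt
  rw [pvScan_eq_pvToggle (pvPreprocess sql.toList).length _ le_rfl, pvToggle_eq_pvSegLoop]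
  rfl
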